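-- pv_equiv track=rewrite | github.com/inkyu-yoon/Study_Algorithm | 파이썬/프로그래머스/Lv2/스킬트리/Main.py | solution
-- ===== SOURCE A (Python) =====
-- def solution(skill, skill_trees):
--     answer = 0
--     dic = {}
--
--     for i in range(len(skill)):
--         dic[skill[i]] = i
--
--     for skill_tree in skill_trees:
--         stack = []
--         _list = list(skill_tree)
--
--         for i in range(len(skill_tree)):
--             sk = skill_tree[i]
--             if sk in dic.keys():
--                 if dic[sk] == len(stack):
--                     stack.append(sk)
--                 else:
--                     break
--         else:
--             answer += 1
--
--     return answer
-- ===== SOURCE B (Python) =====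
-- def solution(skill, skill_trees):
--     # Count trees whose subsequence of skill-relevant characters is a prefix of skill.
--     return sum(1 for tree in skill_trees
--                if skill.startswith(''.join(c for c in tree if c in skill)))
-- ===== Notes on version B (the rewrite author's own statement) =====
-- stated objective: idiomatic
-- what changed: Replaces the position dict, explicit stack counter and break/else loop by filtering each tree to its skill characters and testing that the filtered string is a prefix of skill via startswith.
-- outside the precondition, e.g. on solution('AA', ['A']): A returns 0, B returns 1
import Mathlib
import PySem

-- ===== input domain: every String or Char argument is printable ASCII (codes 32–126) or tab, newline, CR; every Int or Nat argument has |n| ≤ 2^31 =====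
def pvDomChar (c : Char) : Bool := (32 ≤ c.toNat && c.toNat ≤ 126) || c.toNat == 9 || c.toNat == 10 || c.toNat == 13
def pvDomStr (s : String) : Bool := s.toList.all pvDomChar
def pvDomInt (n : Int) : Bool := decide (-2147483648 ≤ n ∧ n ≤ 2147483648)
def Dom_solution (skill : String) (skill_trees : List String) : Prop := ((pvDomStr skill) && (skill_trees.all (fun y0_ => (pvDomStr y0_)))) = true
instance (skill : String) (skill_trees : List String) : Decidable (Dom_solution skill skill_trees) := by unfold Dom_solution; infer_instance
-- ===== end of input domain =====

-- B replaces A's position dict + stack counter + break/else loop by filtering each tree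
-- to its skill characters and testing that string with startswith against skill (idiomatic).


-- ===== PORT A =====
-- `for i in range(len(skill)): dic[skill[i]] = i`  (index/char pairs = enumerate)
def buildDic (skill : List Char) : PySem.Dict Char Int :=
  (PySem.List.enumerate skill 0).foldl (fun d p => d.insert p.2 p.1) PySem.Dict.empty

-- the inner `for i in range(len(skill_tree))` loop with its break/else; `dic[sk]` is
-- guarded by `sk in dic.keys()`, so getD with any default is exact here.
def aLoop (dic : PySem.Dict Char Int) : List Char → List Char → Bool
  | [], _ => true
  | sk :: rest, stack =>
    if dic.contains sk then
      if dic.getD sk 0 == (stack.length : Int) then aLoop dic rest (stack ++ [sk])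
      else false
    else aLoop dic rest stack

def solution (skill : String) (skill_trees : List String) : Int :=
  let dic := buildDic skill.toList
  skill_trees.foldl (fun answer t => if aLoop dic t.toList [] then answer + 1 else answer) 0

-- ===== PORT B =====
def solution_alt (skill : String) (skill_trees : List String) : Int :=
  skill_trees.foldl (fun acc t =>
    let s := t.toList.filter (fun c => PySem.Chars.isIn [c] skill.toList)  -- c in skill
    if PySem.Chars.startswith skill.toList s then acc + 1 else acc) 0

-- ===== PRECONDITION & SPEC =====
-- Pre_ excludes skills with duplicate characters: there A's dict overwrites the key with
-- the LAST index (an accident of the duplicate-key insertion), while B uses the first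
-- occurrence; on distinct skill characters (the setting of the task) both agree.
def Pre_solution (skill : String) (_skill_trees : List String) : Prop :=
  skill.toList.Nodup
instance (skill : String) (skill_trees : List String) : Decidable (Pre_solution skill skill_trees) := by unfold Pre_solution; infer_instance
def pvWitness_solution : String × List String := ("CBD", ["BACDE", "CBADF", "AECB", "BDA"])

def Spec_solution (skill : String) (skill_trees : List String) (out : Int) : Prop := out = solution_alt skill skill_trees
instance (skill : String) (skill_trees : List String) (out : Int) : Decidable (Spec_solution skill skill_trees out) := by unfold Spec_solution; infer_instance

-- ===== CLAIM (what is proved, stated in full; the proofs are below) =====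
def Claim_equal_solution : Prop := ∀ (skill : String) (skill_trees : List String), Dom_solution skill skill_trees → Pre_solution skill skill_trees → Spec_solution skill skill_trees (solution skill skill_trees)

-- ===== LEMMAS AND PROOFS =====

-- `c in skill` (substring test with a 1-char needle) is membership
theorem isIn_singleton (c : Char) (L : List Char) :
    PySem.Chars.isIn [c] L = decide (c ∈ L) := by
  by_cases h : c ∈ L
  · simp only [h, decide_true]
    rw [PySem.Chars.isIn_iff_infix]
    obtain ⟨l, r, rfl⟩ := List.append_of_mem h
    exact ⟨l, r, by simp⟩
  · simp only [h, decide_false]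
    rw [PySem.Chars.isIn_eq_false_iff]
    intro hin
    exact h (hin.subset (by simp))

theorem buildAux_not_mem (c : Char) (L : List Char) (s : Int) (d : PySem.Dict Char Int)
    (h : c ∉ L) :
    ((PySem.List.enumerate L s).foldl (fun d p => d.insert p.2 p.1) d).get? c = d.get? c := by
  induction L generalizing s d with
  | nil => simp [PySem.List.enumerate_nil]
  | cons a L ih =>
    rw [PySem.List.enumerate_cons]
    simp only [List.foldl_cons]
    rw [ih _ _ (fun hc => h (List.mem_cons_of_mem _ hc))]
    exact PySem.Dict.get?_insert_of_ne _ _ (fun hc => h (hc ▸ List.mem_cons_self))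

theorem buildAux_mem (L : List Char) (hnd : L.Nodup) (c : Char) (s : Int)
    (d : PySem.Dict Char Int) (k : Nat) (hk : k < L.length) (hc : L[k] = c) :
    ((PySem.List.enumerate L s).foldl (fun d p => d.insert p.2 p.1) d).get? c
      = some (s + k) := by
  induction L generalizing s d k with
  | nil => simp at hk
  | cons a L ih =>
    rw [PySem.List.enumerate_cons]
    simp only [List.foldl_cons]
    rcases k with _ | k
    · simp only [List.getElem_cons_zero] at hc
      subst hc
      rw [buildAux_not_mem _ _ _ _ (List.nodup_cons.mp hnd).1]
      simp [PySem.Dict.get?_insert_self]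
    · simp only [List.getElem_cons_succ] at hc
      have := ih (List.nodup_cons.mp hnd).2 (s + 1) (d.insert a s) k
        (by simpa using hk) hc
      rw [this]
      congr 1
      push_cast
      ring

theorem buildDic_get? (L : List Char) (hnd : L.Nodup) (c : Char) (k : Nat)
    (hk : k < L.length) (hc : L[k] = c) :
    (buildDic L).get? c = some (k : Int) := by
  have := buildAux_mem L hnd c 0 PySem.Dict.empty k hk hc
  simpa [buildDic] using this

theorem buildDic_get?_not_mem (L : List Char) (c : Char) (h : c ∉ L) :
    (buildDic L).get? c = none := by
  unfold buildDic
  rw [buildAux_not_mem _ _ _ _ h]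
  exact PySem.Dict.get?_empty _

theorem buildDic_contains (L : List Char) (hnd : L.Nodup) (c : Char) :
    (buildDic L).contains c = decide (c ∈ L) := by
  rw [PySem.Dict.contains_eq_isSome_get?]
  by_cases h : c ∈ L
  · obtain ⟨k, hk, hc⟩ := List.getElem_of_mem h
    rw [buildDic_get? L hnd c k hk hc]
    simp [h]
  · rw [buildDic_get?_not_mem L c h]
    simp [h]

-- the core correspondence: A's stack-counter loop is B's prefix test on the filtered tree
theorem aLoop_eq (L : List Char) (hnd : L.Nodup) (T : List Char) (stack : List Char) :
    aLoop (buildDic L) T stack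
      = (T.filter (fun c => PySem.Chars.isIn [c] L)).isPrefixOf (L.drop stack.length) := by
  induction T generalizing stack with
  | nil => simp [aLoop]
  | cons c T ih =>
    rw [aLoop]
    by_cases hm : c ∈ L
    · rw [buildDic_contains L hnd c]
      simp only [hm, decide_true, if_true]
      obtain ⟨j, hj, hc⟩ := List.getElem_of_mem hm
      have hget := buildDic_get? L hnd c j hj hc
      have hgetD : (buildDic L).getD c 0 = (j : Int) := by
        rw [PySem.Dict.getD_eq_get?_getD, hget]; rfl
      rw [hgetD]
      simp only [List.filter_cons, isIn_singleton, hm, decide_true, if_true]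
      by_cases hjk : j = stack.length
      · have hdrop : L.drop j = c :: L.drop (j + 1) := by
          rw [List.drop_eq_getElem_cons hj, hc]
        rw [← hjk]
        simp only [beq_self_eq_true, if_true]
        rw [ih, hdrop]
        have hlen : (stack ++ [c]).length = j + 1 := by simp [hjk]
        rw [hlen]
        simp [isIn_singleton]
      · have : ((j : Int) == (stack.length : Int)) = false := by
          simp [hjk]
        rw [this]
        simp only [Bool.false_eq_true, if_false]
        by_cases hk : stack.length < L.length
        · have hdrop : L.drop stack.length = L[stack.length] :: L.drop (stack.length + 1) :=
            List.drop_eq_getElem_cons hk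
          rw [hdrop]
          simp only [List.isPrefixOf_cons₂]
          have : (c == L[stack.length]) = false := by
            simp only [beq_eq_false_iff_ne, ne_eq]
            intro he
            exact hjk (hnd.getElem_inj_iff.mp (by rw [hc, he]))
          simp [this]
        · rw [List.drop_eq_nil_of_le (by omega)]
          simp [List.isPrefixOf]
    · rw [buildDic_contains L hnd c]
      simp only [hm, decide_false, Bool.false_eq_true, if_false]
      rw [ih]
      simp [isIn_singleton, hm]

theorem startswith_eq_isPrefixOf (L s : List Char) :
    PySem.Chars.startswith L s = s.isPrefixOf L := by
  by_cases h : s <+: L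
  · rw [(PySem.Chars.startswith_iff L s).mpr h, (List.isPrefixOf_iff_prefix).mpr h]
  · have h1 : PySem.Chars.startswith L s = false := by
      cases hb : PySem.Chars.startswith L s with
      | false => rfl
      | true => exact absurd ((PySem.Chars.startswith_iff L s).mp hb) h
    have h2 : s.isPrefixOf L = false := by
      cases hb : s.isPrefixOf L with
      | false => rfl
      | true => exact absurd (List.isPrefixOf_iff_prefix.mp hb) h
    rw [h1, h2]

-- ===== VERDICT (by name: the statement is the Claim_ definition above) =====
theorem foldl_count_congr {α : Type} (f g : α → Bool) (h : ∀ t, f t = g t) :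
    ∀ (ts : List α) (a : Int),
      ts.foldl (fun x t => if f t then x + 1 else x) a
        = ts.foldl (fun x t => if g t then x + 1 else x) a := by
  intro ts
  induction ts with
  | nil => intro a; rfl
  | cons t ts ih => intro a; simp only [List.foldl_cons, h t]; exact ih _

theorem solution_spec : Claim_equal_solution := by
  intro skill skill_trees _ hpre
  unfold Spec_solution solution solution_alt
  exact foldl_count_congr _ _
    (fun t => by
      rw [aLoop_eq skill.toList hpre t.toList [], startswith_eq_isPrefixOf]
      simp) skill_trees 0
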